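-- pv_equiv track=rewrite | github.com/BaldiSlayer/rofl-lab1 | interpret/logic/interpret.py | to_prefix_notation
-- ===== SOURCE A (Python) =====
-- def to_prefix_notation(expression, index):
--     variables_set = set()
--     expression = expression.replace('**', '^')
--
--     summands = expression.split(' + ')
--     prefix_expression = '(+'
--     for summand in summands:
--         multipliers = summand.split('*')
--         prefix_multipliers = '(*'
--         for multiplier in multipliers:
--             if multiplier.isnumeric():
--                 prefix_multipliers = prefix_multipliers + ' ' + multiplier
--             elif multiplier.isalpha():
--                 variable = multiplier + index
--                 variables_set.add(variable)
--                 prefix_multipliers = prefix_multipliers + ' ' + variable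
--             else:
--                 power = multiplier.split('^')
--                 variable = power[0] + index
--                 variables_set.add(variable)
--                 prefix_power = ' (^ ' + variable + ' ' + power[1] + ')'
--                 prefix_multipliers += prefix_power
--         prefix_expression = prefix_expression + ' ' + prefix_multipliers + ')'
--     prefix_expression += ')'
--     return prefix_expression, variables_set
-- ===== SOURCE B (Python) =====
-- def _classify(multiplier, index):
--     """Classify one multiplier into a tagged record ('num'|'var'|'pow', text, exponent)."""
--     if multiplier.isnumeric():
--         return ('num', multiplier, '')
--     if multiplier.isalpha():
--         return ('var', multiplier + index, '')
--     power = multiplier.split('^')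
--     return ('pow', power[0] + index, power[1])
--
--
-- def _render(term):
--     """Render one tagged record as its piece of the prefix string."""
--     if term[0] == 'pow':
--         return ' (^ ' + term[1] + ' ' + term[2] + ')'
--     return ' ' + term[1]
--
--
-- def to_prefix_notation(expression, index):
--     # parse pass: structured terms + variable set
--     variables_set = set()
--     terms = []
--     for summand in expression.replace('**', '^').split(' + '):
--         factors = []
--         for multiplier in summand.split('*'):
--             t = _classify(multiplier, index)
--             if t[0] != 'num':
--                 variables_set.add(t[1])
--             factors.append(t)
--         terms.append(factors)
--     # render pass
--     rendered = ['(*' + ''.join(_render(t) for t in fs) + ')' for fs in terms]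
--     return '(+ ' + ' '.join(rendered) + ')', variables_set
-- ===== Notes on version B (the rewrite author's own statement) =====
-- stated objective: alternative
-- what changed: A builds the prefix string and the variable set in one interleaved pass with string accumulators; B first parses the expression into a list of tagged (num/var/pow) records while collecting the variable set, then a separate render pass maps the records to strings and joins them.
import Mathlib
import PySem

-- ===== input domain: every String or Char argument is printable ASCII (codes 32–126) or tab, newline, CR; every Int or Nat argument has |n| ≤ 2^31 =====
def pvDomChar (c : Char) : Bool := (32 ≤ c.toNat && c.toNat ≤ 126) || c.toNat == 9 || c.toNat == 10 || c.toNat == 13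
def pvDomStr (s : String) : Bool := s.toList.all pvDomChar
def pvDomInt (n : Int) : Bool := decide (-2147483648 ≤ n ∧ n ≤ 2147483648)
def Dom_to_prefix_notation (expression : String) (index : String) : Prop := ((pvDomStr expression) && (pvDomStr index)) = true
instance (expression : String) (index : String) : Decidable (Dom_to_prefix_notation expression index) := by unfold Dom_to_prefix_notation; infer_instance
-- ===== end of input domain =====

-- B re-decomposes A's single interleaved loop into a parse pass (tagged records + variable set)
-- and a separate render pass (map + join); same cost, objective: alternative.
-- Python's isnumeric()/isalpha() are ported as PySem.Chars.strIsdigit/strIsalpha, exact on the ASCII domain Dom_.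

-- ===== PORT A =====
-- A's inner loop body: one multiplier folded into (prefix_multipliers, variables_set)
def pvAMul (index : List Char) (st : List Char × PySem.Set (List Char)) (m : List Char) :
    List Char × PySem.Set (List Char) :=
  if PySem.Chars.strIsdigit m then (st.1 ++ [' '] ++ m, st.2)
  else if PySem.Chars.strIsalpha m then
    let v := m ++ index
    (st.1 ++ [' '] ++ v, PySem.Set.add st.2 v)
  else
    let power := PySem.Chars.splitOn m ['^']
    let v := (PySem.List.pyGet? power 0).getD [] ++ index
    -- power[1] raises IndexError in Python when absent: those inputs are outside Pre_
    (st.1 ++ (" (^ ".toList ++ v ++ [' '] ++ (PySem.List.pyGet? power 1).getD [] ++ [')']),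
      PySem.Set.add st.2 v)

-- A's outer loop body: one summand folded into (prefix_expression, variables_set)
def pvASummand (index : List Char) (st : List Char × PySem.Set (List Char)) (summand : List Char) :
    List Char × PySem.Set (List Char) :=
  let inner := (PySem.Chars.splitOn summand ['*']).foldl (pvAMul index) ("(*".toList, st.2)
  (st.1 ++ [' '] ++ inner.1 ++ [')'], inner.2)

def to_prefix_notation (expression : String) (index : String) : String × List String :=
  let expr := PySem.Chars.replace expression.toList "**".toList "^".toList
  let summands := PySem.Chars.splitOn expr " + ".toList
  let r := summands.foldl (pvASummand index.toList) ("(+".toList, PySem.Set.empty)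
  (String.ofList (r.1 ++ [')']), r.2.map String.ofList)

-- ===== PORT B =====
-- a tagged record: (tag, text, exponent)
def pvClassify (index : List Char) (m : List Char) : List Char × List Char × List Char :=
  if PySem.Chars.strIsdigit m then ("num".toList, m, [])
  else if PySem.Chars.strIsalpha m then ("var".toList, m ++ index, [])
  else
    let power := PySem.Chars.splitOn m ['^']
    ("pow".toList, (PySem.List.pyGet? power 0).getD [] ++ index, (PySem.List.pyGet? power 1).getD [])

def pvRender (t : List Char × List Char × List Char) : List Char :=
  if t.1 = "pow".toList then " (^ ".toList ++ t.2.1 ++ [' '] ++ t.2.2 ++ [')']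
  else ' ' :: t.2.1

-- parse pass, inner loop: fold one multiplier into (factors, variables_set)
def pvBMul (index : List Char)
    (st : List (List Char × List Char × List Char) × PySem.Set (List Char)) (m : List Char) :
    List (List Char × List Char × List Char) × PySem.Set (List Char) :=
  let t := pvClassify index m
  (st.1 ++ [t], if t.1 ≠ "num".toList then PySem.Set.add st.2 t.2.1 else st.2)

-- parse pass, outer loop: fold one summand into (terms, variables_set)
def pvBSummand (index : List Char)
    (st : List (List (List Char × List Char × List Char)) × PySem.Set (List Char))
    (summand : List Char) :
    List (List (List Char × List Char × List Char)) × PySem.Set (List Char) :=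
  let fr := (PySem.Chars.splitOn summand ['*']).foldl (pvBMul index) ([], st.2)
  (st.1 ++ [fr.1], fr.2)

def to_prefix_notation_alt (expression : String) (index : String) : String × List String :=
  let expr := PySem.Chars.replace expression.toList "**".toList "^".toList
  let pr := (PySem.Chars.splitOn expr " + ".toList).foldl (pvBSummand index.toList)
      ([], PySem.Set.empty)
  let rendered := pr.1.map (fun fs => "(*".toList ++ PySem.Chars.join [] (fs.map pvRender) ++ [')'])
  (String.ofList ("(+ ".toList ++ PySem.Chars.join [' '] rendered ++ [')']), pr.2.map String.ofList)

-- ===== PRECONDITION & SPEC =====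
-- Pre_ excludes exactly the inputs where Python A raises IndexError: some multiplier that is
-- neither numeric nor alphabetic and contains no '^' (so power[1] does not exist).
def Pre_to_prefix_notation (expression : String) (index : String) : Prop :=
  ∀ summand ∈ PySem.Chars.splitOn
      (PySem.Chars.replace expression.toList "**".toList "^".toList) " + ".toList,
    ∀ m ∈ PySem.Chars.splitOn summand ['*'],
      PySem.Chars.strIsdigit m = true ∨ PySem.Chars.strIsalpha m = true ∨
        2 ≤ (PySem.Chars.splitOn m ['^']).length

instance (expression : String) (index : String) : Decidable (Pre_to_prefix_notation expression index) := by
  unfold Pre_to_prefix_notation; infer_instance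

def pvWitness_to_prefix_notation : String × String := ("x*2 + y**3", "1")

def Spec_to_prefix_notation (expression : String) (index : String) (out : String × List String) : Prop := out = to_prefix_notation_alt expression index
instance (expression : String) (index : String) (out : String × List String) : Decidable (Spec_to_prefix_notation expression index out) := by unfold Spec_to_prefix_notation; infer_instance

-- ===== CLAIM (what is proved, stated in full; the proofs are below) =====
def Claim_equal_to_prefix_notation : Prop := ∀ (expression : String) (index : String), Dom_to_prefix_notation expression index → Pre_to_prefix_notation expression index → Spec_to_prefix_notation expression index (to_prefix_notation expression index)

-- ===== LEMMAS AND PROOFS =====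

-- Chars.join with the empty separator is flatten
theorem pvFlatIntersperse (l : List (List Char)) :
    (List.intersperse ([] : List Char) l).flatten = l.flatten := by
  induction l with
  | nil => rfl
  | cons a t ih =>
    cases t with
    | nil => rfl
    | cons b u => simp_all [List.intersperse]

theorem pvJoinNil (l : List (List Char)) : PySem.Chars.join [] l = l.flatten := by
  simp [PySem.Chars.join, List.intercalate, pvFlatIntersperse]

-- splitOn never returns the empty list
theorem pvSplitOnGoNeNil (sep : List Char) (fuel : Nat) : ∀ (l cur : List Char)
    (acc : List (List Char)), PySem.Chars.splitOn.go sep fuel l cur acc ≠ [] := by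
  induction fuel with
  | zero => intro l cur acc; rw [PySem.Chars.splitOn.go]; simp
  | succ n ih =>
    intro l cur acc
    cases l with
    | nil => rw [PySem.Chars.splitOn.go]; simp; omega
    | cons c rest =>
      rw [PySem.Chars.splitOn.go]
      split
      · exact ih _ _ _
      · exact ih _ _ _

theorem pvSplitOnNeNil (s sep : List Char) : PySem.Chars.splitOn s sep ≠ [] := by
  unfold PySem.Chars.splitOn; exact pvSplitOnGoNeNil _ _ _ _ _

-- one multiplier: A's step appends exactly the rendering of B's classified record,
-- and updates the variable set exactly as B's parse step does
theorem pvMulStep (idx : List Char) (pm : List Char) (vs : PySem.Set (List Char)) (m : List Char)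
    (fs : List (List Char × List Char × List Char)) :
    pvAMul idx (pm, vs) m = (pm ++ pvRender (pvClassify idx m), (pvBMul idx (fs, vs) m).2) := by
  unfold pvAMul pvBMul pvClassify pvRender
  split_ifs <;> simp_all

-- inner loops agree: A's string accumulator = prefix ++ rendered factors of B's record list
theorem pvInner (idx : List Char) (ms : List (List Char)) (pm : List Char)
    (fs : List (List Char × List Char × List Char)) (vs : PySem.Set (List Char)) :
    ms.foldl (pvAMul idx) (pm ++ PySem.Chars.join [] (fs.map pvRender), vs)
      = (pm ++ PySem.Chars.join [] (((ms.foldl (pvBMul idx) (fs, vs)).1).map pvRender),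
         (ms.foldl (pvBMul idx) (fs, vs)).2) := by
  induction ms generalizing fs vs with
  | nil => simp
  | cons m t ih =>
    simp only [List.foldl_cons]
    have h1 : pvAMul idx (pm ++ PySem.Chars.join [] (fs.map pvRender), vs) m
        = (pm ++ PySem.Chars.join [] ((fs ++ [pvClassify idx m]).map pvRender),
           (pvBMul idx (fs, vs) m).2) := by
      rw [pvMulStep idx _ vs m fs]
      simp [pvJoinNil, List.append_assoc]
    rw [h1]
    have h2 : pvBMul idx (fs, vs) m
        = (fs ++ [pvClassify idx m], (pvBMul idx (fs, vs) m).2) := rfl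
    rw [h2, ih]

-- B's rendering of one summand group
def pvX (fs : List (List Char × List Char × List Char)) : List Char :=
  "(*".toList ++ PySem.Chars.join [] (fs.map pvRender) ++ [')']

-- outer loops agree
theorem pvOuter (idx : List Char) (ss : List (List Char))
    (terms : List (List (List Char × List Char × List Char))) (vs : PySem.Set (List Char)) :
    ss.foldl (pvASummand idx) ("(+".toList ++ (terms.map (fun fs => ' ' :: pvX fs)).flatten, vs)
      = ("(+".toList ++ (((ss.foldl (pvBSummand idx) (terms, vs)).1).map (fun fs => ' ' :: pvX fs)).flatten,
         (ss.foldl (pvBSummand idx) (terms, vs)).2) := by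
  induction ss generalizing terms vs with
  | nil => simp
  | cons s t ih =>
    simp only [List.foldl_cons]
    have hin := pvInner idx (PySem.Chars.splitOn s ['*']) "(*".toList [] vs
    simp only [List.map_nil, pvJoinNil, List.flatten_nil, List.append_nil] at hin
    have h1 : pvASummand idx ("(+".toList ++ (terms.map (fun fs => ' ' :: pvX fs)).flatten, vs) s
        = ("(+".toList ++ ((terms ++ [((PySem.Chars.splitOn s ['*']).foldl (pvBMul idx) ([], vs)).1]).map (fun fs => ' ' :: pvX fs)).flatten,
           ((PySem.Chars.splitOn s ['*']).foldl (pvBMul idx) ([], vs)).2) := by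
      simp only [pvASummand]
      rw [hin]
      simp [pvX, pvJoinNil, List.append_assoc]
    rw [h1]
    have h2 : pvBSummand idx (terms, vs) s
        = (terms ++ [((PySem.Chars.splitOn s ['*']).foldl (pvBMul idx) ([], vs)).1],
           ((PySem.Chars.splitOn s ['*']).foldl (pvBMul idx) ([], vs)).2) := rfl
    rw [h2, ih]

-- B's parse pass collects one record list per summand
theorem pvBLen (idx : List Char) (ss : List (List Char)) :
    ∀ (terms : List (List (List Char × List Char × List Char))) (vs : PySem.Set (List Char)),
    ((ss.foldl (pvBSummand idx) (terms, vs)).1).length = terms.length + ss.length := by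
  induction ss with
  | nil => intro terms vs; simp
  | cons s t ih =>
    intro terms vs
    simp only [List.foldl_cons]
    rw [show pvBSummand idx (terms, vs) s
        = (terms ++ [((PySem.Chars.splitOn s ['*']).foldl (pvBMul idx) ([], vs)).1],
           ((PySem.Chars.splitOn s ['*']).foldl (pvBMul idx) ([], vs)).2) from rfl, ih]
    simp; omega

-- gluing: a nonempty list of space-prefixed pieces is a space and the ' '-join of the pieces
theorem pvGlue (a : List Char) (l : List (List Char)) :
    ((a :: l).map (fun r => ' ' :: r)).flatten = ' ' :: PySem.Chars.join [' '] (a :: l) := by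
  induction l generalizing a with
  | nil => simp [PySem.Chars.join_singleton]
  | cons b u ih =>
    rw [PySem.Chars.join_cons_cons]
    simp only [List.map_cons, List.flatten_cons] at *
    rw [ih b]
    simp

-- ===== VERDICT (by name: the statement is the Claim_ definition above) =====
theorem to_prefix_notation_spec : Claim_equal_to_prefix_notation := by
  intro expression index _ _
  unfold Spec_to_prefix_notation
  simp only [to_prefix_notation, to_prefix_notation_alt]
  have hout := pvOuter index.toList
    (PySem.Chars.splitOn (PySem.Chars.replace expression.toList "**".toList "^".toList) " + ".toList)
    [] PySem.Set.empty
  simp only [List.map_nil, List.flatten_nil, List.append_nil] at hout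
  rw [hout]
  have hne : ((PySem.Chars.splitOn (PySem.Chars.replace expression.toList "**".toList "^".toList)
      " + ".toList).foldl (pvBSummand index.toList) ([], PySem.Set.empty)).1 ≠ [] := by
    have hlen := pvBLen index.toList
      (PySem.Chars.splitOn (PySem.Chars.replace expression.toList "**".toList "^".toList) " + ".toList)
      [] PySem.Set.empty
    have hs := pvSplitOnNeNil (PySem.Chars.replace expression.toList "**".toList "^".toList) " + ".toList
    intro hc
    rw [hc] at hlen
    simp at hlen
    exact hs (List.eq_nil_of_length_eq_zero hlen.symm)
  obtain ⟨a, l, hl⟩ := List.exists_cons_of_ne_nil hne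
  rw [hl]
  have hmm : ((a :: l).map (fun fs => ' ' :: pvX fs))
      = (((a :: l).map pvX).map (fun r => ' ' :: r)) := by simp
  rw [hmm, show ((a :: l).map pvX) = pvX a :: l.map pvX from rfl, pvGlue]
  rfl
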